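-- pv_equiv track=rewrite | github.com/helineva/tdd2024 | exercise-6/game-of-life/src/rle.py | __decode_pattern
-- ===== SOURCE A (Python) =====
-- def __decode_pattern(pattern, width):
--     run_count = None
--     decoded = []
--     cell_count = 0
--
--     for c in pattern:
--         if c in "bo":
--             if run_count == 0:
--                 raise Exception("invalid pattern")
--             if run_count is None:
--                 run_count = 1
--             decoded.extend([c == "o"]*run_count)
--             cell_count += run_count
--             if cell_count > width:
--                 raise Exception("invalid pattern")
--             run_count = None
--         elif c in "0123456789":
--             run_count = int(c) if run_count is None else 10*run_count + int(c)
--         elif c == "$":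
--             if run_count == 0:
--                 raise Exception("invalid pattern")
--             if run_count is None:
--                 run_count = 1
--             for _ in range(run_count):
--                 decoded.extend([False]*(width-cell_count))
--                 cell_count = 0
--             run_count = None
--         elif c == "!":
--             if cell_count > 0:
--                 decoded.extend([False]*(width-cell_count))
--             break
--         else:
--             raise Exception("invalid pattern")
--
--     return decoded
-- ===== SOURCE B (Python) =====
-- def __decode_pattern(pattern, width):
--     # Phase 1: tokenize into (count, symbol) units; count is None when no digits precede.
--     tokens = []
--     i, n = 0, len(pattern)
--     while i < n:
--         j = i
--         while j < n and pattern[j] in "0123456789":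
--             j += 1
--         if j == n:
--             break  # trailing digits (or end): nothing more to decode
--         c = pattern[j]
--         if c not in "bo$!":
--             raise Exception("invalid pattern")
--         tokens.append((int(pattern[i:j]) if j > i else None, c))
--         i = j + 1
--         if c == "!":
--             break
--     # Phase 2: decode the token list.
--     decoded = []
--     cell_count = 0
--     for count, c in tokens:
--         if c == "!":
--             if cell_count > 0:
--                 decoded.extend([False] * (width - cell_count))
--             break
--         if count == 0:
--             raise Exception("invalid pattern")
--         if count is None:
--             count = 1
--         if c == "$":
--             for _ in range(count):
--                 decoded.extend([False] * (width - cell_count))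
--                 cell_count = 0
--         else:
--             decoded.extend([c == "o"] * count)
--             cell_count += count
--             if cell_count > width:
--                 raise Exception("invalid pattern")
--     return decoded
-- ===== Notes on version B (the rewrite author's own statement) =====
-- stated objective: alternative
-- what changed: B splits A's single char-by-char state machine (which carries run_count through the scan) into two phases: a tokenizer that parses the pattern into an ordered list of (count, symbol) units, then a decoder loop over that token list; Pre_ excludes exactly the inputs on which A raises Exception('invalid pattern') (illegal character, explicit zero run count before b/o/$, or a row exceeding width), where B raises too.
import Mathlib
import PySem

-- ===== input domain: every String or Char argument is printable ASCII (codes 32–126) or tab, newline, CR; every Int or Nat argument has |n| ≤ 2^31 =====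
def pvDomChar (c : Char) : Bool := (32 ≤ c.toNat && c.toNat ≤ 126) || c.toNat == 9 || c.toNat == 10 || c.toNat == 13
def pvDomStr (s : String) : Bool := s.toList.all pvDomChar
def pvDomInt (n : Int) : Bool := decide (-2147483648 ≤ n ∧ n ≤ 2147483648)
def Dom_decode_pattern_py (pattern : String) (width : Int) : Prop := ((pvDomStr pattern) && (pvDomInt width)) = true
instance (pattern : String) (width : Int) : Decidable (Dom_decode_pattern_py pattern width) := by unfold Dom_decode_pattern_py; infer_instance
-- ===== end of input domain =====

-- B replaces A's single char-by-char state machine by a two-phase decomposition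
-- (tokenize into (count, symbol) units, then decode the token list); objective: alternative, same cost.

-- ===== PORT A =====
-- int(c) for a single ASCII digit c (exact on '0'..'9')
def pvDigit (c : Char) : Int := (c.toNat : Int) - 48

-- the inner `for _ in range(run_count)` loop of A's '$' branch
def pvDollarA : Nat → List Bool → Int → Int → (List Bool × Int)
  | 0, dec, cell, _ => (dec, cell)
  | n + 1, dec, cell, width => pvDollarA n (dec ++ List.replicate (width - cell).toNat false) 0 width

-- A's for-loop over the pattern; state = (run_count, decoded, cell_count).
-- Where the Python raises, the port returns [] (those inputs are outside Pre_).
def pvGoA : List Char → Option Int → List Bool → Int → Int → List Bool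
  | [], _, dec, _, _ => dec
  | c :: cs, run, dec, cell, width =>
    if c = 'b' ∨ c = 'o' then
      if run = some 0 then []
      else
        let r := run.getD 1
        let dec' := dec ++ List.replicate r.toNat (c == 'o')
        let cell' := cell + r
        if cell' > width then [] else pvGoA cs none dec' cell' width
    else if c.isDigit then
      pvGoA cs (some (match run with | none => pvDigit c | some r => 10 * r + pvDigit c)) dec cell width
    else if c = '$' then
      if run = some 0 then []
      else
        let p := pvDollarA (run.getD 1).toNat dec cell width
        pvGoA cs none p.1 p.2 width
    else if c = '!' then
      if cell > 0 then dec ++ List.replicate (width - cell).toNat false else dec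
    else []

def decode_pattern_py (pattern : String) (width : Int) : List Bool :=
  pvGoA pattern.toList none [] 0 width

-- ===== PORT B =====
-- Phase 1 of Source B: split off the digit prefix, classify the following symbol, recurse.
-- none = the Python tokenizer raises "invalid pattern".
def pvTokB (cs : List Char) : Option (List (Option Int × Char)) :=
  match h : cs.dropWhile Char.isDigit with
  | [] => some []
  | c :: rest =>
    let ds := cs.takeWhile Char.isDigit
    let cnt : Option Int :=
      if ds.isEmpty then none
      else some (ds.foldl (fun a d => 10 * a + pvDigit d) 0)  -- int(pattern[i:j]), exact on digit strings
    if c = 'b' ∨ c = 'o' ∨ c = '$' then (pvTokB rest).map (fun ts => (cnt, c) :: ts)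
    else if c = '!' then some [(cnt, '!')]
    else none
termination_by cs.length
decreasing_by
  have hle := List.length_dropWhile_le Char.isDigit cs
  rw [h] at hle
  simp at hle
  omega

-- the inner `for _ in range(count)` loop of Source B's '$' branch
def pvDollarB : Nat → List Bool → Int → Int → (List Bool × Int)
  | 0, dec, cell, _ => (dec, cell)
  | n + 1, dec, cell, width => pvDollarB n (dec ++ List.replicate (width - cell).toNat false) 0 width

-- Phase 2 of Source B: decode the token list; [] stands for the Python raises.
def pvDecB : List (Option Int × Char) → List Bool → Int → Int → List Bool
  | [], dec, _, _ => dec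
  | (cnt, c) :: ts, dec, cell, width =>
    if c = '!' then
      if cell > 0 then dec ++ List.replicate (width - cell).toNat false else dec
    else if cnt = some 0 then []
    else
      let r := cnt.getD 1
      if c = '$' then
        let p := pvDollarB r.toNat dec cell width
        pvDecB ts p.1 p.2 width
      else
        let dec' := dec ++ List.replicate r.toNat (c == 'o')
        let cell' := cell + r
        if cell' > width then [] else pvDecB ts dec' cell' width

def decode_pattern_py_alt (pattern : String) (width : Int) : List Bool :=
  match pvTokB pattern.toList with
  | none => []
  | some ts => pvDecB ts [] 0 width

-- ===== PRECONDITION & SPEC =====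
-- Standalone scanner/validity check used only by Pre_: the pattern must parse into the
-- RLE grammar (digits* followed by b/o/$/! up to the first '!'), no run count may be the
-- literal 0 before b/o/$, and no row may exceed `width` cells — exactly where Python A
-- returns without raising "invalid pattern".
def pvScan : List Char → Option Int → Option (List (Option Int × Char))
  | [], _ => some []
  | c :: cs, run =>
    if c.isDigit then pvScan cs (some (10 * run.getD 0 + pvDigit c))
    else if c = 'b' ∨ c = 'o' ∨ c = '$' then (pvScan cs none).map (fun ts => (run, c) :: ts)
    else if c = '!' then some [(run, '!')]
    else none

def pvTokensOk : List (Option Int × Char) → Int → Int → Bool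
  | [], _, _ => true
  | (cnt, c) :: ts, cell, width =>
    if c = '!' then true
    else if cnt = some 0 then false
    else if c = '$' then pvTokensOk ts 0 width
    else decide (cell + cnt.getD 1 ≤ width) && pvTokensOk ts (cell + cnt.getD 1) width

def pvValid (pattern : String) (width : Int) : Bool :=
  match pvScan pattern.toList none with
  | none => false
  | some ts => pvTokensOk ts 0 width

def Pre_decode_pattern_py (pattern : String) (width : Int) : Prop :=
  pvValid pattern width = true
instance (pattern : String) (width : Int) : Decidable (Pre_decode_pattern_py pattern width) := by
  unfold Pre_decode_pattern_py; infer_instance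

def pvWitness_decode_pattern_py : String × Int := ("2o$o!", 3)

def Spec_decode_pattern_py (pattern : String) (width : Int) (out : List Bool) : Prop := out = decode_pattern_py_alt pattern width
instance (pattern : String) (width : Int) (out : List Bool) : Decidable (Spec_decode_pattern_py pattern width out) := by unfold Spec_decode_pattern_py; infer_instance

-- ===== CLAIM (what is proved, stated in full; the proofs are below) =====
def Claim_equal_decode_pattern_py : Prop := ∀ (pattern : String) (width : Int), Dom_decode_pattern_py pattern width → Pre_decode_pattern_py pattern width → Spec_decode_pattern_py pattern width (decode_pattern_py pattern width)

-- ===== LEMMAS AND PROOFS =====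

lemma dollarA_eq_dollarB : ∀ (n : Nat) (dec : List Bool) (cell width : Int),
    pvDollarA n dec cell width = pvDollarB n dec cell width := by
  intro n
  induction n with
  | zero => intro dec cell width; rfl
  | succ n ih => intro dec cell width; simp [pvDollarA, pvDollarB, ih]

lemma scan_pending (cs : List Char) : ∀ (r : Int),
    pvScan cs (some r) =
      match cs.dropWhile Char.isDigit with
      | [] => some []
      | c :: rest =>
        if c = 'b' ∨ c = 'o' ∨ c = '$' then
          (pvScan rest none).map (fun ts =>
            (some ((cs.takeWhile Char.isDigit).foldl (fun a d => 10 * a + pvDigit d) r), c) :: ts)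
        else if c = '!' then
          some [(some ((cs.takeWhile Char.isDigit).foldl (fun a d => 10 * a + pvDigit d) r), '!')]
        else none := by
  induction cs with
  | nil => intro r; simp [pvScan]
  | cons c cs ih =>
    intro r
    by_cases hd : c.isDigit
    · simp [pvScan, hd, ih]
    · simp [pvScan, hd]

lemma scan_none (cs : List Char) :
    pvScan cs none =
      match cs.dropWhile Char.isDigit with
      | [] => some []
      | c :: rest =>
        let ds := cs.takeWhile Char.isDigit
        let cnt : Option Int :=
          if ds.isEmpty then none
          else some (ds.foldl (fun a d => 10 * a + pvDigit d) 0)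
        if c = 'b' ∨ c = 'o' ∨ c = '$' then (pvScan rest none).map (fun ts => (cnt, c) :: ts)
        else if c = '!' then some [(cnt, '!')]
        else none := by
  cases cs with
  | nil => simp [pvScan]
  | cons c cs =>
    by_cases hd : c.isDigit
    · rw [show pvScan (c :: cs) none = pvScan cs (some (pvDigit c)) by
        simp [pvScan, hd]]
      rw [scan_pending]
      simp [hd]
    · simp [pvScan, hd]

lemma tokB_eq_scan (cs : List Char) : pvTokB cs = pvScan cs none := by
  induction cs using pvTokB.induct with
  | case1 cs h => rw [pvTokB, scan_none]; rw [h]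
  | case2 cs c rest h hc ih =>
    rw [pvTokB, scan_none]
    rw [h]
    simp only [hc, if_pos, ih]
  | case3 cs rest h hc =>
    rw [pvTokB, scan_none]
    rw [h]
    simp
  | case4 cs c rest h hc hbang =>
    rw [pvTokB, scan_none]
    rw [h]
    simp [hc, hbang]

lemma goA_eq_dec (cs : List Char) : ∀ (run : Option Int) (dec : List Bool) (cell width : Int),
    pvGoA cs run dec cell width =
      match pvScan cs run with
      | none => []
      | some ts => pvDecB ts dec cell width := by
  induction cs with
  | nil => intro run dec cell width; simp [pvGoA, pvScan, pvDecB]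
  | cons c cs ih =>
    intro run dec cell width
    by_cases hbo : c = 'b' ∨ c = 'o'
    · have hd : ¬ c.isDigit := by rcases hbo with h | h <;> subst h <;> decide
      have hne : ¬ c = '!' := by rcases hbo with h | h <;> subst h <;> decide
      have hnd : ¬ c = '$' := by rcases hbo with h | h <;> subst h <;> decide
      rw [show pvScan (c :: cs) run
            = (pvScan cs none).map (fun ts => (run, c) :: ts) by
          simp [pvScan, hd, hbo, hnd]]
      rw [pvGoA.eq_def]
      simp only [hbo, if_pos]
      by_cases h0 : run = some 0
      · cases hscan : pvScan cs none <;> simp [h0, pvDecB, hne]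
      · simp only [h0, ite_false]
        by_cases hw : cell + run.getD 1 > width
        · cases hscan : pvScan cs none <;>
            simp [hw, pvDecB, hne, hnd, h0]
        · simp only [hw, ite_false]
          rw [ih]
          cases hscan : pvScan cs none with
          | none => simp
          | some ts => simp [pvDecB, hne, hnd, h0, hw]
    · by_cases hd : c.isDigit
      · rw [show pvScan (c :: cs) run = pvScan cs (some (10 * run.getD 0 + pvDigit c)) by
          simp [pvScan, hd]]
        rw [pvGoA.eq_def]
        simp only [hbo, hd, if_pos, ite_false]
        rw [ih]
        have : (match run with | none => pvDigit c | some r => 10 * r + pvDigit c)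
            = 10 * run.getD 0 + pvDigit c := by cases run <;> simp
        rw [this]
      · by_cases hdol : c = '$'
        · subst hdol
          rw [show pvScan ('$' :: cs) run
                = (pvScan cs none).map (fun ts => (run, '$') :: ts) by
              simp [pvScan]]
          rw [pvGoA.eq_def]
          simp only [hbo, hd, ite_true, ite_false]
          by_cases h0 : run = some 0
          · cases hscan : pvScan cs none <;> simp [h0, pvDecB]
          · simp only [h0, ite_false]
            cases hscan : pvScan cs none with
            | none => simp [ih, hscan]
            | some ts => simp [ih, hscan, pvDecB, h0, dollarA_eq_dollarB]
        · by_cases hbang : c = '!'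
          · subst hbang
            rw [show pvScan ('!' :: cs) run = some [(run, '!')] by simp [pvScan]]
            rw [pvGoA.eq_def]
            simp [hd, pvDecB]
          · rw [show pvScan (c :: cs) run = none by
              simp [pvScan, hd, hbo, hdol, hbang]]
            rw [pvGoA.eq_def]
            simp [hbo, hd, hdol, hbang]

-- ===== VERDICT (by name: the statement is the Claim_ definition above) =====
theorem decode_pattern_py_spec : Claim_equal_decode_pattern_py := by
  intro pattern width _ _
  unfold Spec_decode_pattern_py decode_pattern_py decode_pattern_py_alt
  rw [tokB_eq_scan, goA_eq_dec]
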